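-- pv_equiv track=rewrite | github.com/THU-BPM/GradLRE | src/cbert_utils.py | get_entity_pos
-- ===== SOURCE A (Python) =====
-- def get_entity_pos(sentence_token_list):
--     pos1 = []
--     pos2 = []
--     e1_flag = 0
--     e2_flag = 0
--     for i in range(len(sentence_token_list)):
--         if sentence_token_list[i] == ">" and sentence_token_list[i-1] == "##1" and sentence_token_list[i-3] == "<":
--             e1_flag = 1
--             if e1_flag == 1 and e2_flag == 0:
--                 pos1.append(i+1-4)
--             else:
--                 pos1.append(i+1-13)
--         if sentence_token_list[i] == "<" and i+3 < len(sentence_token_list) and sentence_token_list[i+1] == "/" and sentence_token_list[i+3] == "##1":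
--             if e1_flag == 1 and e2_flag == 0:
--                 pos1.append(i-1-4)
--             else:
--                 pos1.append(i-1-13)
--         if sentence_token_list[i] == ">" and sentence_token_list[i-1] == "##2" and sentence_token_list[i-3] == "<":
--             e2_flag = 1
--             if e1_flag == 1 and e2_flag == 1:
--                 pos2.append(i+1-13)
--             else:
--                 pos2.append(i+1-4)
--         if sentence_token_list[i] == "<" and i+3 < len(sentence_token_list) and sentence_token_list[i+1] == "/" and sentence_token_list[i+3] == "##2":
--             if e1_flag == 1 and e2_flag == 1:
--                 pos2.append(i-1-13)
--             else:
--                 pos2.append(i-1-4)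
--     return pos1, pos2
-- ===== SOURCE B (Python) =====
-- def get_entity_pos(sentence_token_list):
--     t = sentence_token_list
--     n = len(t)
--     s1 = [i for i in range(n) if t[i] == ">" and t[i-1] == "##1" and t[i-3] == "<"]
--     s2 = [i for i in range(n) if t[i] == ">" and t[i-1] == "##2" and t[i-3] == "<"]
--     c1 = [i for i in range(n) if t[i] == "<" and i + 3 < n and t[i+1] == "/" and t[i+3] == "##1"]
--     c2 = [i for i in range(n) if t[i] == "<" and i + 3 < n and t[i+1] == "/" and t[i+3] == "##2"]
--     f1 = s1[0] if s1 else n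
--     f2 = s2[0] if s2 else n
--     pairs1 = [(i, i - 3 if i < f2 else i - 12) for i in s1] + \
--              [(i, i - 5 if f1 < i < f2 else i - 14) for i in c1]
--     pairs2 = [(i, i - 12 if f1 < i else i - 3) for i in s2] + \
--              [(i, i - 14 if f1 < i and f2 < i else i - 5) for i in c2]
--     pos1 = [v for _, v in sorted(pairs1, key=lambda p: p[0])]
--     pos2 = [v for _, v in sorted(pairs2, key=lambda p: p[0])]
--     return pos1, pos2
-- ===== Notes on version B (the rewrite author's own statement) =====
-- stated objective: alternative
-- what changed: B replaces A's single stateful scan with mutable e1/e2 flags by a declarative pipeline: list comprehensions extract the four pattern-match index lists, the flag state is replaced by closed-form threshold comparisons against the first start-match indices (sentinel n), and pos1/pos2 are produced by a key-sorted merge of (index, offset) pairs instead of in-loop appends.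
-- outside the precondition, e.g. on get_entity_pos(['>', '##1']): A raises IndexError, B raises IndexError; on get_entity_pos(['>', '##2']): A raises IndexError, B raises IndexError
import Mathlib
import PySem

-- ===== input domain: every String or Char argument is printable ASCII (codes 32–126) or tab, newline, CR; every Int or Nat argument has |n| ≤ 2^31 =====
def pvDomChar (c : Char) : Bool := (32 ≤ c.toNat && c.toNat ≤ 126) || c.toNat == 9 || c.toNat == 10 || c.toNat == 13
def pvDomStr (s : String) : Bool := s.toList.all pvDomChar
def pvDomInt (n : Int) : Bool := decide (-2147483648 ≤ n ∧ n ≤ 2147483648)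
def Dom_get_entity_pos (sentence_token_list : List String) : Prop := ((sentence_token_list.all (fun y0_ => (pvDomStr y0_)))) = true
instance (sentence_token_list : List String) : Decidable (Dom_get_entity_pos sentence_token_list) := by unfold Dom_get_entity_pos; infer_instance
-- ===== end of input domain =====

-- B replaces A's stateful flag-carrying scan by extracting the four pattern-match index lists,
-- deriving the flag state as closed-form threshold comparisons, and merging (index, offset)
-- pairs with a key sort; objective: alternative decomposition, same observable behaviour.

-- ===== PORT A =====
-- loop body of A: the four pattern branches, updating (pos1, pos2, e1_flag, e2_flag)
def pvAStep (xs : List String) (st : List Int × List Int × Bool × Bool) (iN : Nat) :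
    List Int × List Int × Bool × Bool :=
  let n : Int := (xs.length : Int)
  let i : Int := (iN : Int)
  let (pos1, pos2, e1, e2) := st
  let e1 := if (PySem.List.pyGet? xs i == some ">") && (PySem.List.pyGet? xs (i-1) == some "##1") && (PySem.List.pyGet? xs (i-3) == some "<") then true else e1
  let pos1 := if (PySem.List.pyGet? xs i == some ">") && (PySem.List.pyGet? xs (i-1) == some "##1") && (PySem.List.pyGet? xs (i-3) == some "<") then
      (if e1 && !e2 then pos1 ++ [i+1-4] else pos1 ++ [i+1-13]) else pos1
  let pos1 := if (PySem.List.pyGet? xs i == some "<") && decide (i+3 < n) && (PySem.List.pyGet? xs (i+1) == some "/") && (PySem.List.pyGet? xs (i+3) == some "##1") then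
      (if e1 && !e2 then pos1 ++ [i-1-4] else pos1 ++ [i-1-13]) else pos1
  let e2 := if (PySem.List.pyGet? xs i == some ">") && (PySem.List.pyGet? xs (i-1) == some "##2") && (PySem.List.pyGet? xs (i-3) == some "<") then true else e2
  let pos2 := if (PySem.List.pyGet? xs i == some ">") && (PySem.List.pyGet? xs (i-1) == some "##2") && (PySem.List.pyGet? xs (i-3) == some "<") then
      (if e1 && e2 then pos2 ++ [i+1-13] else pos2 ++ [i+1-4]) else pos2
  let pos2 := if (PySem.List.pyGet? xs i == some "<") && decide (i+3 < n) && (PySem.List.pyGet? xs (i+1) == some "/") && (PySem.List.pyGet? xs (i+3) == some "##2") then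
      (if e1 && e2 then pos2 ++ [i-1-13] else pos2 ++ [i-1-4]) else pos2
  (pos1, pos2, e1, e2)

def get_entity_pos (sentence_token_list : List String) : List Int × List Int :=
  let r := (List.range sentence_token_list.length).foldl (pvAStep sentence_token_list) ([], [], false, false)
  (r.1, r.2.1)

-- ===== PORT B =====
-- B's pattern predicates (the comprehension filters of Source B)
def pvS1 (xs : List String) (i : Int) : Bool :=
  (PySem.List.pyGet? xs i == some ">") && (PySem.List.pyGet? xs (i-1) == some "##1") && (PySem.List.pyGet? xs (i-3) == some "<")

def pvS2 (xs : List String) (i : Int) : Bool :=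
  (PySem.List.pyGet? xs i == some ">") && (PySem.List.pyGet? xs (i-1) == some "##2") && (PySem.List.pyGet? xs (i-3) == some "<")

def pvC (xs : List String) (i : Int) (name : String) : Bool :=
  (PySem.List.pyGet? xs i == some "<") && decide (i+3 < (xs.length : Int)) && (PySem.List.pyGet? xs (i+1) == some "/") && (PySem.List.pyGet? xs (i+3) == some name)

def get_entity_pos_alt (sentence_token_list : List String) : List Int × List Int :=
  let xs := sentence_token_list
  let n := xs.length
  let s1 := (List.range n).filter (fun k : Nat => pvS1 xs (k : Int))
  let s2 := (List.range n).filter (fun k : Nat => pvS2 xs (k : Int))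
  let c1 := (List.range n).filter (fun k : Nat => pvC xs (k : Int) "##1")
  let c2 := (List.range n).filter (fun k : Nat => pvC xs (k : Int) "##2")
  let f1 := s1.headD n        -- s1[0] if s1 else n
  let f2 := s2.headD n        -- s2[0] if s2 else n
  let pairs1 := s1.map (fun k : Nat => (k, if k < f2 then (k : Int) - 3 else (k : Int) - 12)) ++
                c1.map (fun k : Nat => (k, if f1 < k ∧ k < f2 then (k : Int) - 5 else (k : Int) - 14))
  let pairs2 := s2.map (fun k : Nat => (k, if f1 < k then (k : Int) - 12 else (k : Int) - 3)) ++
                c2.map (fun k : Nat => (k, if f1 < k ∧ f2 < k then (k : Int) - 14 else (k : Int) - 5))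
  let pos1 := (PySem.List.sorted pairs1 (fun p => p.1) false).map (fun p => p.2)
  let pos2 := (PySem.List.sorted pairs2 (fun p => p.1) false).map (fun p => p.2)
  (pos1, pos2)

-- ===== PRECONDITION & SPEC =====
-- A (and B alike) raises IndexError exactly on the two-element lists [">", "##1"] and [">", "##2"]
-- (token[-3] is evaluated after the first two comparisons succeed and is out of range); Pre_ excludes them.
def Pre_get_entity_pos (sentence_token_list : List String) : Prop :=
  ¬ (sentence_token_list.length = 2 ∧ PySem.List.pyGet? sentence_token_list 0 = some ">" ∧
      (PySem.List.pyGet? sentence_token_list 1 = some "##1" ∨ PySem.List.pyGet? sentence_token_list 1 = some "##2"))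
instance (sentence_token_list : List String) : Decidable (Pre_get_entity_pos sentence_token_list) := by
  unfold Pre_get_entity_pos; infer_instance

def pvWitness_get_entity_pos : List String :=
  ["<", "e1", "##1", ">", "was", "in", "<", "e2", "##2", ">", "<", "/", "e1", "##1", ">", "<", "/", "e2", "##2", ">"]

def Spec_get_entity_pos (sentence_token_list : List String) (out : List Int × List Int) : Prop := out = get_entity_pos_alt sentence_token_list
instance (sentence_token_list : List String) (out : List Int × List Int) : Decidable (Spec_get_entity_pos sentence_token_list out) := by unfold Spec_get_entity_pos; infer_instance

-- ===== CLAIM (what is proved, stated in full; the proofs are below) =====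
def Claim_equal_get_entity_pos : Prop := ∀ (sentence_token_list : List String), Dom_get_entity_pos sentence_token_list → Pre_get_entity_pos sentence_token_list → Spec_get_entity_pos sentence_token_list (get_entity_pos sentence_token_list)

-- ===== LEMMAS AND PROOFS =====
def pvF1 (xs : List String) : Option Nat := (List.range xs.length).find? (fun k : Nat => pvS1 xs (k : Int))
def pvF2 (xs : List String) : Option Nat := (List.range xs.length).find? (fun k : Nat => pvS2 xs (k : Int))

-- the flag value entering iteration k: "the first match is strictly before k"
def pvFlagLt (first : Option Nat) (k : Nat) : Bool :=
  match first with
  | some j => decide (j < k)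
  | none => false

-- the per-index contribution of A's iteration k to pos1 / pos2 (flags as threshold tests)
def pvContrib1 (xs : List String) (k : Nat) : List Int :=
  (if pvS1 xs (k : Int) then [if pvFlagLt (pvF2 xs) k then (k : Int) - 12 else (k : Int) - 3] else []) ++
  (if pvC xs (k : Int) "##1" then [if pvFlagLt (pvF1 xs) k && !pvFlagLt (pvF2 xs) k then (k : Int) - 5 else (k : Int) - 14] else [])

def pvContrib2 (xs : List String) (k : Nat) : List Int :=
  (if pvS2 xs (k : Int) then [if pvFlagLt (pvF1 xs) k then (k : Int) - 12 else (k : Int) - 3] else []) ++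
  (if pvC xs (k : Int) "##2" then [if pvFlagLt (pvF1 xs) k && pvFlagLt (pvF2 xs) k then (k : Int) - 14 else (k : Int) - 5] else [])

lemma find?_range_spec (p : Nat → Bool) (n j : Nat) (h : (List.range n).find? p = some j) :
    p j = true ∧ ∀ m, m < j → p m = false := by
  induction n with
  | zero => simp at h
  | succ n ih =>
    rw [List.range_succ, List.find?_append] at h
    cases hf : (List.range n).find? p with
    | some j' =>
      rw [hf] at h
      simp at h
      subst h
      exact ih hf
    | none =>
      rw [hf] at h
      simp only [Option.none_or, List.find?_cons, List.find?_nil] at h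
      cases hp : p n with
      | true =>
        rw [hp] at h
        simp at h
        subst h
        refine ⟨hp, fun m hm => ?_⟩
        have := List.find?_eq_none.mp hf m (List.mem_range.mpr hm)
        simpa using this
      | false =>
        rw [hp] at h
        simp at h

lemma flagLt_succ (p : Nat → Bool) (n k : Nat) (hk : k < n) :
    pvFlagLt ((List.range n).find? p) (k+1) = (pvFlagLt ((List.range n).find? p) k || p k) := by
  cases hf : (List.range n).find? p with
  | none =>
    have : p k = false := by
      have := List.find?_eq_none.mp hf k (List.mem_range.mpr hk)
      simpa using this
    simp [pvFlagLt, this]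
  | some j =>
    obtain ⟨hpj, hmin⟩ := find?_range_spec p n j hf
    simp only [pvFlagLt]
    rcases lt_trichotomy j k with h|h|h
    · simp [h, Nat.lt_succ_of_lt h]
    · subst h; simp [hpj]
    · have hk' : p k = false := hmin k h
      simp [hk', Nat.not_le.mpr h, Nat.not_lt.mpr (Nat.le_of_lt h)]

-- mutual exclusivity of patterns at the same index
lemma ex_s1_s2 (xs : List String) (i : Int) (h : pvS1 xs i = true) : pvS2 xs i = false := by
  simp only [pvS1, Bool.and_eq_true, beq_iff_eq] at h
  simp [pvS2, h.1.2]
lemma ex_c_s1 (xs : List String) (i : Int) (name : String) (h : pvC xs i name = true) : pvS1 xs i = false := by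
  simp only [pvC, Bool.and_eq_true, beq_iff_eq] at h
  simp [pvS1, h.1.1.1]
lemma ex_c_s2 (xs : List String) (i : Int) (name : String) (h : pvC xs i name = true) : pvS2 xs i = false := by
  simp only [pvC, Bool.and_eq_true, beq_iff_eq] at h
  simp [pvS2, h.1.1.1]

-- A's fold carries exactly (flatMap of the contributions, flags as threshold tests)
set_option maxHeartbeats 2000000 in
lemma pv_invariant (xs : List String) : ∀ k, k ≤ xs.length →
    (List.range k).foldl (pvAStep xs) ([], [], false, false) =
      ((List.range k).flatMap (pvContrib1 xs), (List.range k).flatMap (pvContrib2 xs),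
       pvFlagLt (pvF1 xs) k, pvFlagLt (pvF2 xs) k) := by
  intro k
  induction k with
  | zero =>
    intro _
    cases h1 : pvF1 xs <;> cases h2 : pvF2 xs <;> simp [pvFlagLt]
  | succ k ih =>
    intro hk
    have hk' : k < xs.length := hk
    have h1 : pvFlagLt (pvF1 xs) (k+1) = (pvFlagLt (pvF1 xs) k || pvS1 xs (k : Int)) :=
      flagLt_succ _ _ _ hk'
    have h2 : pvFlagLt (pvF2 xs) (k+1) = (pvFlagLt (pvF2 xs) k || pvS2 xs (k : Int)) :=
      flagLt_succ _ _ _ hk'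
    rw [List.range_succ, List.foldl_append, List.foldl_cons, List.foldl_nil,
        ih (Nat.le_of_lt hk'), List.flatMap_append, List.flatMap_append]
    simp only [List.flatMap_cons, List.flatMap_nil, List.append_nil]
    simp only [pvAStep, pvContrib1, pvContrib2, h1, h2]
    have A1 : ((PySem.List.pyGet? xs (k : Int) == some ">") && (PySem.List.pyGet? xs ((k : Int)-1) == some "##1") && (PySem.List.pyGet? xs ((k : Int)-3) == some "<")) = pvS1 xs (k : Int) := rfl
    have A2 : ((PySem.List.pyGet? xs (k : Int) == some "<") && decide ((k : Int)+3 < (xs.length : Int)) && (PySem.List.pyGet? xs ((k : Int)+1) == some "/") && (PySem.List.pyGet? xs ((k : Int)+3) == some "##1")) = pvC xs (k : Int) "##1" := rfl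
    have A3 : ((PySem.List.pyGet? xs (k : Int) == some ">") && (PySem.List.pyGet? xs ((k : Int)-1) == some "##2") && (PySem.List.pyGet? xs ((k : Int)-3) == some "<")) = pvS2 xs (k : Int) := rfl
    have A4 : ((PySem.List.pyGet? xs (k : Int) == some "<") && decide ((k : Int)+3 < (xs.length : Int)) && (PySem.List.pyGet? xs ((k : Int)+1) == some "/") && (PySem.List.pyGet? xs ((k : Int)+3) == some "##2")) = pvC xs (k : Int) "##2" := rfl
    simp only [A1, A2, A3, A4]
    rcases Bool.eq_false_or_eq_true (pvS1 xs (k : Int)) with hs1|hs1 <;>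
    rcases Bool.eq_false_or_eq_true (pvS2 xs (k : Int)) with hs2|hs2 <;>
    rcases Bool.eq_false_or_eq_true (pvC xs (k : Int) "##1") with hc1|hc1 <;>
    rcases Bool.eq_false_or_eq_true (pvC xs (k : Int) "##2") with hc2|hc2 <;>
      simp_all [ex_s1_s2, ex_c_s1 xs (k : Int) "##1", ex_c_s2 xs (k : Int) "##1",
        ex_c_s1 xs (k : Int) "##2", ex_c_s2 xs (k : Int) "##2"] <;>
    rcases Bool.eq_false_or_eq_true (pvFlagLt (pvF1 xs) k) with ha|ha <;>
    rcases Bool.eq_false_or_eq_true (pvFlagLt (pvF2 xs) k) with hb|hb <;>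
    simp_all <;> omega

-- generic: mapping snd over a filterMap whose per-index images agree with a flatMap
lemma map_snd_filterMap_eq_flatMap (l : List Nat) (G : Nat → Option (Nat × Int)) (c : Nat → List Int)
    (h : ∀ k ∈ l, (Option.map Prod.snd (G k)).toList = c k) :
    (l.filterMap G).map Prod.snd = l.flatMap c := by
  induction l with
  | nil => simp
  | cons a l ih =>
    have ha := h a (List.mem_cons_self)
    have ih' := ih (fun k hk => h k (List.mem_cons_of_mem _ hk))
    cases hG : G a with
    | none =>
      rw [hG] at ha; simp at ha
      simp [hG, ha, ih']
    | some x =>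
      rw [hG] at ha; simp at ha
      simp [hG, ← ha, ih']

-- generic: a two-pattern filterMap is a permutation of the two filtered maps concatenated
lemma filterMap_perm_split (l : List Nat) (p q : Nat → Bool) (f g : Nat → Nat × Int)
    (hex : ∀ k ∈ l, ¬(p k = true ∧ q k = true)) :
    (l.filterMap (fun k => if p k then some (f k) else if q k then some (g k) else none)).Perm
      ((l.filter p).map f ++ (l.filter q).map g) := by
  induction l with
  | nil => simp
  | cons a l ih =>
    have ih' := ih (fun k hk => hex k (List.mem_cons_of_mem _ hk))
    by_cases hp : p a = true
    · have hq : q a = false := by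
        cases h : q a with
        | false => rfl
        | true => exact absurd ⟨hp, h⟩ (hex a List.mem_cons_self)
      simp only [List.filterMap_cons, List.filter_cons, hp, hq, if_pos,
        Bool.false_eq_true, if_false, List.map_cons, List.cons_append]
      exact ih'.cons _
    · have hp' : p a = false := Bool.eq_false_iff.mpr hp
      by_cases hq : q a = true
      · simp only [List.filterMap_cons, List.filter_cons, hp', hq, Bool.false_eq_true,
          if_false, if_true, List.map_cons]
        exact (ih'.cons (g a)).trans (List.perm_middle.symm)
      · have hq' : q a = false := Bool.eq_false_iff.mpr hq
        simp only [List.filterMap_cons, List.filter_cons, hp', hq', Bool.false_eq_true, if_false]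
        exact ih'

-- abbreviations for B's threshold indices
def pvT1 (xs : List String) : Nat := ((List.range xs.length).filter (fun k : Nat => pvS1 xs (k : Int))).headD xs.length
def pvT2 (xs : List String) : Nat := ((List.range xs.length).filter (fun k : Nat => pvS2 xs (k : Int))).headD xs.length

lemma headD_filter_eq_find (xs : List String) (p : Nat → Bool) :
    ((List.range xs.length).filter p).headD xs.length =
      ((List.range xs.length).find? p).getD xs.length := by
  rw [List.headD_eq_head?_getD, List.head?_filter]

-- threshold tests vs flag tests, per fired pattern at k < n
lemma t1_lt_iff (xs : List String) (k : Nat) (hk : k < xs.length) :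
    pvT1 xs < k ↔ pvFlagLt (pvF1 xs) k = true := by
  unfold pvT1
  rw [headD_filter_eq_find]
  cases hf : (List.range xs.length).find? (fun k : Nat => pvS1 xs (k : Int)) with
  | none => unfold pvF1; rw [hf]; simp [pvFlagLt]; omega
  | some j => unfold pvF1; rw [hf]; simp [pvFlagLt]

lemma t2_lt_iff (xs : List String) (k : Nat) (hk : k < xs.length) :
    pvT2 xs < k ↔ pvFlagLt (pvF2 xs) k = true := by
  unfold pvT2
  rw [headD_filter_eq_find]
  cases hf : (List.range xs.length).find? (fun k : Nat => pvS2 xs (k : Int)) with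
  | none => unfold pvF2; rw [hf]; simp [pvFlagLt]; omega
  | some j => unfold pvF2; rw [hf]; simp [pvFlagLt]

-- when a pattern other than s2 fires at k, "k < t2" is "not (flag2 before k)"
lemma lt_t2_iff (xs : List String) (k : Nat) (hk : k < xs.length) (hnk : pvS2 xs (k : Int) = false) :
    k < pvT2 xs ↔ pvFlagLt (pvF2 xs) k = false := by
  unfold pvT2
  rw [headD_filter_eq_find]
  cases hf : (List.range xs.length).find? (fun k : Nat => pvS2 xs (k : Int)) with
  | none => unfold pvF2; rw [hf]; simp [pvFlagLt]; omega
  | some j =>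
    unfold pvF2; rw [hf]
    obtain ⟨hpj, _⟩ := find?_range_spec _ _ _ hf
    have hne : k ≠ j := by intro h; rw [h] at hnk; rw [hnk] at hpj; simp at hpj
    simp only [Option.getD_some, pvFlagLt, decide_eq_false_iff_not]
    omega

-- B's pairs lists, named
def pvG1 (xs : List String) (k : Nat) : Option (Nat × Int) :=
  if pvS1 xs (k : Int) then some (k, if k < pvT2 xs then (k : Int) - 3 else (k : Int) - 12)
  else if pvC xs (k : Int) "##1" then some (k, if pvT1 xs < k ∧ k < pvT2 xs then (k : Int) - 5 else (k : Int) - 14)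
  else none

def pvG2 (xs : List String) (k : Nat) : Option (Nat × Int) :=
  if pvS2 xs (k : Int) then some (k, if pvT1 xs < k then (k : Int) - 12 else (k : Int) - 3)
  else if pvC xs (k : Int) "##2" then some (k, if pvT1 xs < k ∧ pvT2 xs < k then (k : Int) - 14 else (k : Int) - 5)
  else none

lemma pairwise_filterMap_range (n : Nat) (G : Nat → Option (Nat × Int))
    (hkey : ∀ k x, G k = some x → x.1 = k) :
    ((List.range n).filterMap G).Pairwise (fun a b => a.1 < b.1) := by
  rw [List.pairwise_filterMap]
  refine List.pairwise_lt_range.imp_of_mem ?_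
  intro a b _ _ hab x hx y hy
  rw [hkey a x hx, hkey b y hy]
  exact hab

lemma sorted_pairs_eq (n : Nat) (G : Nat → Option (Nat × Int)) (p q : Nat → Bool) (f g : Nat → Nat × Int)
    (hkey : ∀ k x, G k = some x → x.1 = k)
    (hG : ∀ k ∈ List.range n, G k = if p k then some (f k) else if q k then some (g k) else none)
    (hex : ∀ k ∈ List.range n, ¬(p k = true ∧ q k = true)) :
    PySem.List.sorted (((List.range n).filter p).map f ++ ((List.range n).filter q).map g)
      (fun x => x.1) false = (List.range n).filterMap G := by
  apply PySem.List.sorted_eq_of_perm_of_pairwise_lt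
  · have := filterMap_perm_split (List.range n) p q f g hex
    refine List.Perm.trans ?_ this
    exact (List.filterMap_congr hG).symm ▸ List.Perm.refl _
  · exact pairwise_filterMap_range n G hkey

lemma pos1_eq (xs : List String) :
    (PySem.List.sorted
      (((List.range xs.length).filter (fun k : Nat => pvS1 xs (k : Int))).map
          (fun k : Nat => (k, if k < pvT2 xs then (k : Int) - 3 else (k : Int) - 12)) ++
        ((List.range xs.length).filter (fun k : Nat => pvC xs (k : Int) "##1")).map
          (fun k : Nat => (k, if pvT1 xs < k ∧ k < pvT2 xs then (k : Int) - 5 else (k : Int) - 14)))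
      (fun p => p.1) false).map (fun p => p.2) =
    (List.range xs.length).flatMap (pvContrib1 xs) := by
  rw [sorted_pairs_eq xs.length (pvG1 xs) _ _ _ _
      (by intro k x hx
          simp only [pvG1] at hx
          split_ifs at hx <;> cases hx <;> rfl)
      (by intro k _; rfl)
      (by intro k _ h; exact absurd ((ex_c_s1 xs (k : Int) "##1" h.2)) (by simp [h.1]))]
  apply map_snd_filterMap_eq_flatMap
  intro k hk
  have hk' : k < xs.length := List.mem_range.mp hk
  simp only [pvG1, pvContrib1]
  rcases Bool.eq_false_or_eq_true (pvS1 xs (k : Int)) with hs1|hs1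
  · have hns2 := ex_s1_s2 xs (k : Int) hs1
    have hnc1 : pvC xs (k : Int) "##1" = false := by
      rcases Bool.eq_false_or_eq_true (pvC xs (k : Int) "##1") with h|h
      · exact absurd hs1 (by simp [ex_c_s1 xs (k : Int) "##1" h])
      · exact h
    simp only [hs1, hnc1, if_true, Bool.false_eq_true, if_false, Option.map_some,
      Option.toList_some, List.append_nil]
    simp only [lt_t2_iff xs k hk' hns2]
    rcases Bool.eq_false_or_eq_true (pvFlagLt (pvF2 xs) k) with hb|hb <;> simp [hb]
  · rcases Bool.eq_false_or_eq_true (pvC xs (k : Int) "##1") with hc1|hc1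
    · have hns2 := ex_c_s2 xs (k : Int) "##1" hc1
      simp only [hs1, hc1, Bool.false_eq_true, if_false, if_true, Option.map_some,
        Option.toList_some, List.nil_append]
      simp only [t1_lt_iff xs k hk', lt_t2_iff xs k hk' hns2]
      rcases Bool.eq_false_or_eq_true (pvFlagLt (pvF1 xs) k) with ha|ha <;>
      rcases Bool.eq_false_or_eq_true (pvFlagLt (pvF2 xs) k) with hb|hb <;> simp [ha, hb]
    · simp [hs1, hc1]

lemma pos2_eq (xs : List String) :
    (PySem.List.sorted
      (((List.range xs.length).filter (fun k : Nat => pvS2 xs (k : Int))).map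
          (fun k : Nat => (k, if pvT1 xs < k then (k : Int) - 12 else (k : Int) - 3)) ++
        ((List.range xs.length).filter (fun k : Nat => pvC xs (k : Int) "##2")).map
          (fun k : Nat => (k, if pvT1 xs < k ∧ pvT2 xs < k then (k : Int) - 14 else (k : Int) - 5)))
      (fun p => p.1) false).map (fun p => p.2) =
    (List.range xs.length).flatMap (pvContrib2 xs) := by
  rw [sorted_pairs_eq xs.length (pvG2 xs) _ _ _ _
      (by intro k x hx
          simp only [pvG2] at hx
          split_ifs at hx <;> cases hx <;> rfl)
      (by intro k _; rfl)
      (by intro k _ h; exact absurd ((ex_c_s2 xs (k : Int) "##2" h.2)) (by simp [h.1]))]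
  apply map_snd_filterMap_eq_flatMap
  intro k hk
  have hk' : k < xs.length := List.mem_range.mp hk
  simp only [pvG2, pvContrib2]
  rcases Bool.eq_false_or_eq_true (pvS2 xs (k : Int)) with hs2|hs2
  · have hnc2 : pvC xs (k : Int) "##2" = false := by
      rcases Bool.eq_false_or_eq_true (pvC xs (k : Int) "##2") with h|h
      · exact absurd hs2 (by simp [ex_c_s2 xs (k : Int) "##2" h])
      · exact h
    simp only [hs2, hnc2, if_true, Bool.false_eq_true, if_false, Option.map_some,
      Option.toList_some, List.append_nil]
    simp only [t1_lt_iff xs k hk']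
  · rcases Bool.eq_false_or_eq_true (pvC xs (k : Int) "##2") with hc2|hc2
    · simp only [hs2, hc2, Bool.false_eq_true, if_false, if_true, Option.map_some,
        Option.toList_some, List.nil_append]
      simp only [t1_lt_iff xs k hk', t2_lt_iff xs k hk']
      rcases Bool.eq_false_or_eq_true (pvFlagLt (pvF1 xs) k) with ha|ha <;>
      rcases Bool.eq_false_or_eq_true (pvFlagLt (pvF2 xs) k) with hb|hb <;> simp [ha, hb]
    · simp [hs2, hc2]

lemma ports_agree (xs : List String) : get_entity_pos xs = get_entity_pos_alt xs := by
  have hA := pv_invariant xs xs.length (Nat.le_refl _)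
  have h1 := pos1_eq xs
  have h2 := pos2_eq xs
  simp only [pvT1, pvT2] at h1 h2
  simp only [get_entity_pos, get_entity_pos_alt, hA]
  exact Prod.ext_iff.mpr ⟨h1.symm, h2.symm⟩

-- ===== VERDICT (by name: the statement is the Claim_ definition above) =====
theorem get_entity_pos_spec : Claim_equal_get_entity_pos := by
  intro xs _ _
  unfold Spec_get_entity_pos
  exact ports_agree xs
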